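-- pv_equiv track=rewrite | github.com/anair0/CS313E | WinStreak.py | longest_win_streak
-- ===== SOURCE A (Python) =====
-- class Queue(object):
--     def __init__(self):
--         self.queue = []
--
--     # add an item to the end of the queue
--     def enqueue(self, item):
--         self.queue.append(item)
--
--     # remove an item from the beginning of the queue
--     def dequeue(self):
--         return self.queue.pop(0)
--
--     # check if the queue if empty
--     def is_empty(self):
--         return len(self.queue) == 0
--
--     # return the size of the queue
--     def size(self):
--         return len(self.queue)
--
--     def __str__(self):
--         s = ''
--         for i in range(len(self.queue)):
--             s += self.queue[i] + ' '
--         return s[:-1]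
--
-- def longest_win_streak(players, winners):
--     red = Queue()
--     blue = Queue()
--
--     red.enqueue(players[0])
--     blue.enqueue(players[1])
--     red.enqueue(players[2])
--     blue.enqueue(players[3])
--
--     reserve = Queue()
--     for i in range(4, len(players)):
--         reserve.enqueue(players[i])
--
--     r_count = 0
--     b_count = 0
--     max_count = 0
--     for i in range(len(winners)):
--         if (winners[i] == 'R'):
--             if (i != 0):
--                 if (winners[i - 1] == 'R'):
--                     r_count += 1
--                 else:
--                     r_count = 1
--             else:
--                 r_count = 1
--         if (winners[i] == 'B'):
--             if (i != 0):
--                 if (winners[i - 1] == 'B'):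
--                     b_count += 1
--                 else:
--                     b_count = 1
--             else:
--                 b_count = 1
--         if (r_count > max_count):
--             max_count = r_count
--         elif (b_count > max_count):
--             max_count = b_count
--     win_streaks = []
--     current_rwins = 0
--     current_bwins = 0
--     for i in range(len(winners)):
--         if (winners[i] == 'R'):
--             current_bwins = 0
--             reserve.enqueue(blue.dequeue())
--             blue.enqueue(reserve.dequeue())
--             current_rwins += 1
--             if (current_rwins == max_count):
--                 copy = red.__str__()
--                 win_streaks.append(copy)
--         if (winners[i] == 'B'):
--             current_rwins = 0
--             reserve.enqueue(red.dequeue())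
--             red.enqueue(reserve.dequeue())
--             current_bwins += 1
--             if (current_bwins == max_count):
--                 copy = blue.__str__()
--                 win_streaks.append(copy)
--     return win_streaks
-- ===== SOURCE B (Python) =====
-- def longest_win_streak(players, winners):
--     # One pass: simulate rotations, record (streak_count, roster) at every
--     # R/B win, track the max run length on the fly; filter records at the end.
--     red = [players[0], players[2]]
--     blue = [players[1], players[3]]
--     reserve = list(players[4:])
--     records = []
--     run = 0
--     max_count = 0
--     rcnt = 0
--     bcnt = 0
--     prev = None
--     for w in winners:
--         if w == 'R':
--             run = run + 1 if prev == 'R' else 1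
--             if run > max_count:
--                 max_count = run
--             bcnt = 0
--             rcnt += 1
--             reserve.append(blue.pop(0))
--             blue.append(reserve.pop(0))
--             records.append((rcnt, ' '.join(red)))
--         elif w == 'B':
--             run = run + 1 if prev == 'B' else 1
--             if run > max_count:
--                 max_count = run
--             rcnt = 0
--             bcnt += 1
--             reserve.append(red.pop(0))
--             red.append(reserve.pop(0))
--             records.append((bcnt, ' '.join(blue)))
--         prev = w
--     return [team for cnt, team in records if cnt == max_count]
-- ===== Notes on version B (the rewrite author's own statement) =====
-- stated objective: simpler
-- what changed: Replaces the Queue class and A's two index-based passes (a stale-dual-counter max pass peeking at winners[i-1], then a separate simulation pass) with a single previous-element-carrying pass over winners that records (streak_count, roster) at every win and a final filter by the max run length.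
import Mathlib
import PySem

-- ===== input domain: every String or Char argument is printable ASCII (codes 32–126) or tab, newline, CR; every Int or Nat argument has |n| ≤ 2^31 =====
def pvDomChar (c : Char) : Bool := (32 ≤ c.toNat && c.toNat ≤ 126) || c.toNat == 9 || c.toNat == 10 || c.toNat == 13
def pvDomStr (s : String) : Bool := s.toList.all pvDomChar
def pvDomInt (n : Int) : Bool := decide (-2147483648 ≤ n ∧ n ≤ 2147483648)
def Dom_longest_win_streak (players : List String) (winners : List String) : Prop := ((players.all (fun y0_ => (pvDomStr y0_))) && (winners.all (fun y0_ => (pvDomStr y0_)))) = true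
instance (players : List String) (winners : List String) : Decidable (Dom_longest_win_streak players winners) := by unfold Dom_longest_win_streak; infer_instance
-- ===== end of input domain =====

-- B replaces the Queue class and A's two index-based passes with a single
-- previous-element-carrying pass that records (streak, roster) at every win
-- plus a final filter by the maximal run length (objective: simpler).


-- ===== PORT A =====
-- A Queue is its underlying list; enqueue = append. Queue.dequeue is list.pop(0),
-- which raises IndexError on an empty list; under Pre_ (players has ≥ 4 entries)
-- every queue A dequeues from is nonempty, so pvDequeue's "" default is never used.
def pvDequeue (q : List String) : String × List String :=
  match q with
  | [] => ("", [])          -- Python would raise IndexError here (unreachable under Pre_)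
  | x :: xs => (x, xs)

-- Queue.__str__: s = ''; for i in range(len(q)): s += q[i] + ' '; return s[:-1]
def pvQStr (q : List String) : String :=
  PySem.Str.slice
    ((PySem.List.pyRange 0 (PySem.List.len q)).foldl
      (fun s i => s ++ PySem.List.pyGetD q i "" ++ " ") "")
    none (some (-1))

-- body of A's first loop: state (r_count, b_count, max_count), index i
def pvStep1 (ws : List String) (st : Int × Int × Int) (i : Int) : Int × Int × Int :=
  let r := if PySem.List.pyGetD ws i "" == "R" then
      (if i ≠ 0 then (if PySem.List.pyGetD ws (i - 1) "" == "R" then st.1 + 1 else 1) else 1)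
    else st.1
  let b := if PySem.List.pyGetD ws i "" == "B" then
      (if i ≠ 0 then (if PySem.List.pyGetD ws (i - 1) "" == "B" then st.2.1 + 1 else 1) else 1)
    else st.2.1
  let m := if r > st.2.2 then r else if b > st.2.2 then b else st.2.2
  (r, b, m)

-- state of A's second loop
structure ASt where
  red : List String
  blue : List String
  reserve : List String
  streaks : List String
  cr : Int
  cb : Int
deriving Repr, DecidableEq

-- body of A's second loop, w = winners[i] (two sequential ifs, as in A)
def pvStep2 (m : Int) (st : ASt) (w : String) : ASt :=
  let st1 := if w == "R" then
      let d1 := pvDequeue st.blue                 -- blue.dequeue()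
      let reserve1 := st.reserve ++ [d1.1]        -- reserve.enqueue(...)
      let d2 := pvDequeue reserve1                -- reserve.dequeue()
      let blue1 := d1.2 ++ [d2.1]                 -- blue.enqueue(...)
      let cr1 := st.cr + 1
      { red := st.red, blue := blue1, reserve := d2.2,
        streaks := if cr1 == m then st.streaks ++ [pvQStr st.red] else st.streaks,
        cr := cr1, cb := 0 }
    else st
  if w == "B" then
      let d1 := pvDequeue st1.red
      let reserve1 := st1.reserve ++ [d1.1]
      let d2 := pvDequeue reserve1
      let red1 := d1.2 ++ [d2.1]
      let cb1 := st1.cb + 1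
      { red := red1, blue := st1.blue, reserve := d2.2,
        streaks := if cb1 == m then st1.streaks ++ [pvQStr st1.blue] else st1.streaks,
        cr := 0, cb := cb1 }
  else st1

def longest_win_streak (players : List String) (winners : List String) : List String :=
  let red := [PySem.List.pyGetD players 0 "", PySem.List.pyGetD players 2 ""]
  let blue := [PySem.List.pyGetD players 1 "", PySem.List.pyGetD players 3 ""]
  let reserve := (PySem.List.pyRange 4 (PySem.List.len players)).foldl
      (fun q i => q ++ [PySem.List.pyGetD players i ""]) []
  let st1 := (PySem.List.pyRange 0 (PySem.List.len winners)).foldl (pvStep1 winners) (0, 0, 0)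
  let st2 := (PySem.List.pyRange 0 (PySem.List.len winners)).foldl
      (fun st i => pvStep2 st1.2.2 st (PySem.List.pyGetD winners i "")) ⟨red, blue, reserve, [], 0, 0⟩
  st2.streaks

-- ===== PORT B =====
-- state of B's single pass
structure BSt where
  red : List String
  blue : List String
  reserve : List String
  records : List (Int × String)
  run : Int
  mx : Int
  rcnt : Int
  bcnt : Int
  prev : Option String
deriving Repr, DecidableEq

def pvStepB (st : BSt) (w : String) : BSt :=
  if w == "R" then
    let run1 := if st.prev == some "R" then st.run + 1 else 1
    let mx1 := if run1 > st.mx then run1 else st.mx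
    let reserve1 := st.reserve ++ [st.blue.headD ""]   -- blue.pop(0) (nonempty under Pre_)
    let blue1 := st.blue.tail ++ [reserve1.headD ""]   -- reserve.pop(0) (nonempty: just appended)
    { red := st.red, blue := blue1, reserve := reserve1.tail,
      records := st.records ++ [(st.rcnt + 1, PySem.Str.join " " st.red)],
      run := run1, mx := mx1, rcnt := st.rcnt + 1, bcnt := 0, prev := some w }
  else if w == "B" then
    let run1 := if st.prev == some "B" then st.run + 1 else 1
    let mx1 := if run1 > st.mx then run1 else st.mx
    let reserve1 := st.reserve ++ [st.red.headD ""]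
    let red1 := st.red.tail ++ [reserve1.headD ""]
    { red := red1, blue := st.blue, reserve := reserve1.tail,
      records := st.records ++ [(st.bcnt + 1, PySem.Str.join " " st.blue)],
      run := run1, mx := mx1, rcnt := 0, bcnt := st.bcnt + 1, prev := some w }
  else { st with prev := some w }

def longest_win_streak_alt (players : List String) (winners : List String) : List String :=
  let init : BSt :=
    { red := [PySem.List.pyGetD players 0 "", PySem.List.pyGetD players 2 ""],
      blue := [PySem.List.pyGetD players 1 "", PySem.List.pyGetD players 3 ""],
      reserve := PySem.List.slice players (some 4) none,
      records := [], run := 0, mx := 0, rcnt := 0, bcnt := 0, prev := none }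
  let fin := winners.foldl pvStepB init
  (fin.records.filter (fun p => p.1 == fin.mx)).map (fun p => p.2)

-- ===== PRECONDITION & SPEC =====
-- Python A reads players[0..3] and so raises IndexError on fewer than 4 players.
def Pre_longest_win_streak (players : List String) (winners : List String) : Prop :=
  4 ≤ players.length
instance (players : List String) (winners : List String) : Decidable (Pre_longest_win_streak players winners) := by unfold Pre_longest_win_streak; infer_instance

def pvWitness_longest_win_streak : List String × List String :=
  (["ann", "bob", "cal", "dee", "eve"], ["R", "R", "B", "X", "B"])

def Spec_longest_win_streak (players : List String) (winners : List String) (out : List String) : Prop := out = longest_win_streak_alt players winners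
instance (players : List String) (winners : List String) (out : List String) : Decidable (Spec_longest_win_streak players winners out) := by unfold Spec_longest_win_streak; infer_instance

-- ===== CLAIM (what is proved, stated in full; the proofs are below) =====
def Claim_equal_longest_win_streak : Prop := ∀ (players : List String) (winners : List String), Dom_longest_win_streak players winners → Pre_longest_win_streak players winners → Spec_longest_win_streak players winners (longest_win_streak players winners)

-- ===== LEMMAS AND PROOFS =====

theorem pvDequeue_eq (q : List String) : pvDequeue q = (q.headD "", q.tail) := by
  cases q <;> rfl

-- A's __str__ (concatenate-with-space then drop the last char) is ' '.join
theorem fold_concat_toList (q : List String) (s0 : String) :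
    (q.foldl (fun s x => s ++ x ++ " ") s0).toList
      = s0.toList ++ q.flatMap (fun x => x.toList ++ [' ']) := by
  induction q generalizing s0 with
  | nil => simp
  | cons x xs ih => simp [ih, String.toList_append]

theorem dropLast_flatMap_space (q : List String) :
    (q.flatMap (fun x => x.toList ++ [' '])).dropLast
      = PySem.Chars.join [' '] (q.map String.toList) := by
  induction q with
  | nil => simp [PySem.Chars.join_nil]
  | cons x xs ih =>
    cases xs with
    | nil => simp [PySem.Chars.join_singleton]
    | cons y ys =>
      rw [List.map_cons, List.map_cons, PySem.Chars.join_cons_cons, ← List.map_cons, ← ih]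
      have hne : ((y :: ys).flatMap (fun x => x.toList ++ [' '])) ≠ [] := by
        simp [List.flatMap_cons]
      rw [List.flatMap_cons]
      rw [show x.toList ++ [' '] ++ ((y :: ys).flatMap (fun x => x.toList ++ [' ']))
            = (x.toList ++ [' ']) ++ ((y :: ys).flatMap (fun x => x.toList ++ [' '])) from rfl]
      rw [List.dropLast_append_of_ne_nil hne]
theorem pvQStr_eq_join (q : List String) : pvQStr q = PySem.Str.join " " q := by
  apply String.toList_inj.mp
  unfold pvQStr
  rw [PySem.List.len_eq,
      PySem.List.foldl_pyRange_zero_pyGetD' q "" (fun s x => s ++ x ++ " ") ""]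
  rw [PySem.Str.slice_to_neg_one, PySem.Str.toList_join, fold_concat_toList]
  simpa using dropLast_flatMap_space q


-- relation between A's second loop and B's single pass (m is A's max_count)
def pvRel (m : Int) (a : ASt) (b : BSt) : Prop :=
  a.red = b.red ∧ a.blue = b.blue ∧ a.reserve = b.reserve ∧ a.cr = b.rcnt ∧ a.cb = b.bcnt ∧
  a.streaks = (b.records.filter (fun p => p.1 == m)).map (fun p => p.2)

theorem pvStep_rel (m : Int) (a : ASt) (b : BSt) (w : String) (h : pvRel m a b) :
    pvRel m (pvStep2 m a w) (pvStepB b w) := by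
  obtain ⟨h1, h2, h3, h4, h5, h6⟩ := h
  by_cases hR : w = "R"
  · subst hR
    simp only [pvStep2, pvStepB, pvRel, pvDequeue_eq, h1, h2, h3, h4, h6,
      List.filter_append, List.map_append, pvQStr_eq_join, beq_self_eq_true, if_true,
      beq_iff_eq, String.reduceEq, if_false]
    refine ⟨by trivial, by trivial, by trivial, by trivial, by trivial, ?_⟩
    by_cases hm : b.rcnt + 1 = m <;> simp [hm]
  · by_cases hB : w = "B"
    · subst hB
      simp only [pvStep2, pvStepB, pvRel, pvDequeue_eq, h1, h2, h3, h4, h5, h6,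
        List.filter_append, List.map_append, pvQStr_eq_join, beq_self_eq_true, if_true,
        beq_iff_eq, String.reduceEq, if_false]
      refine ⟨by trivial, by trivial, by trivial, by trivial, by trivial, ?_⟩
      by_cases hm : b.bcnt + 1 = m <;> simp [hm]
    · have hR' : (w == "R") = false := by simp [hR]
      have hB' : (w == "B") = false := by simp [hB]
      simp [pvStep2, pvStepB, pvRel, hR', hB', h1, h2, h3, h4, h5, h6]

theorem pvFold_rel (m : Int) : ∀ (ws : List String) (a : ASt) (b : BSt), pvRel m a b →
    pvRel m (ws.foldl (pvStep2 m) a) (ws.foldl pvStepB b) := by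
  intro ws
  induction ws with
  | nil => intro a b h; exact h
  | cons w ws ih => intro a b h; exact ih _ _ (pvStep_rel m a b w h)

-- A's first loop, as written in the port
def pvA1 (ws : List String) : Int × Int × Int :=
  (PySem.List.pyRange 0 (PySem.List.len ws)).foldl (pvStep1 ws) (0, 0, 0)

theorem pvGetD_append_left (xs ys : List String) (i : Int) (d : String)
    (h0 : 0 ≤ i) (h1 : i < (xs.length : Int)) :
    PySem.List.pyGetD (xs ++ ys) i d = PySem.List.pyGetD xs i d := by
  rw [PySem.List.pyGetD_eq_getElem _ d h0 (by simp; omega),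
      PySem.List.pyGetD_eq_getElem _ d h0 h1]
  exact List.getElem_append_left (by omega)

theorem pvStep1_append (ws : List String) (w : String) (st : Int × Int × Int) (i : Int)
    (h0 : 0 ≤ i) (h1 : i < (ws.length : Int)) :
    pvStep1 (ws ++ [w]) st i = pvStep1 ws st i := by
  by_cases hi : i = 0
  · subst hi
    simp [pvStep1, pvGetD_append_left ws [w] 0 "" le_rfl h1]
  · have h0' : (0:Int) ≤ i - 1 := by omega
    have h1' : i - 1 < (ws.length : Int) := by omega
    simp [pvStep1, hi, pvGetD_append_left ws [w] i "" h0 h1,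
          pvGetD_append_left ws [w] (i - 1) "" h0' h1']

-- invariant tying A's first loop to the run/mx/prev fields of B's pass
def pvInv1 (ws : List String) (a : Int × Int × Int) (st : BSt) : Prop :=
  a.2.2 = st.mx ∧ a.1 ≤ st.mx ∧ a.2.1 ≤ st.mx ∧ 0 ≤ a.1 ∧ 0 ≤ a.2.1 ∧
  0 ≤ st.run ∧ st.run ≤ st.mx ∧ st.prev = ws.getLast? ∧
  (st.prev = some "R" → a.1 = st.run) ∧ (st.prev = some "B" → a.2.1 = st.run)

theorem pvLoop1_inv (init : BSt) (hrun : init.run = 0) (hmx : init.mx = 0)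
    (hprev : init.prev = none) :
    ∀ ws : List String, pvInv1 ws (pvA1 ws) (ws.foldl pvStepB init) := by
  intro ws
  induction ws using List.reverseRecOn with
  | nil =>
      simp [pvA1, pvInv1, PySem.List.pyRange_one_eq_nil le_rfl, hrun, hmx, hprev,
            PySem.List.len_eq]
  | append_singleton ws w ih =>
      have hpos : (0:Int) ≤ (ws.length : Int) := by positivity
      have hA : pvA1 (ws ++ [w]) = pvStep1 (ws ++ [w]) (pvA1 ws) (ws.length : Int) := by
        unfold pvA1
        rw [PySem.List.len_eq, PySem.List.len_eq]
        rw [show ((ws ++ [w]).length : Int) = (ws.length : Int) + 1 by simp,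
            PySem.List.pyRange_one_succ_right hpos, List.foldl_append]
        rw [show List.foldl (pvStep1 (ws ++ [w])) ((0:Int), (0:Int), (0:Int))
              (PySem.List.pyRange 0 (ws.length : Int))
            = List.foldl (pvStep1 ws) ((0:Int), (0:Int), (0:Int))
              (PySem.List.pyRange 0 (ws.length : Int)) from
          PySem.List.foldl_congr_mem _ _ _ _
            (by intro acc x hx
                have hm := PySem.List.mem_pyRange_one.mp hx
                exact pvStep1_append ws w acc x hm.1 hm.2)]
        rfl
      have hB : (ws ++ [w]).foldl pvStepB init = pvStepB (ws.foldl pvStepB init) w := by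
        simp
      rw [hA, hB]
      have hgetn : PySem.List.pyGetD (ws ++ [w]) ((ws.length : Int)) "" = w := by
        rw [PySem.List.pyGetD_eq_getElem _ "" hpos (by simp)]
        simp
      obtain ⟨i1, i2, i3, i4, i5, i6, i7, i8, i9, i10⟩ := ih
      by_cases hws : ws = []
      · subst hws
        have ha0 : pvA1 [] = ((0:Int), (0:Int), (0:Int)) := by
          simp [pvA1, PySem.List.len_eq, PySem.List.pyRange_one_eq_nil le_rfl]
        simp only [List.foldl_nil] at *
        rw [ha0]
        by_cases hwR : w = "R"
        · subst hwR
          simp [pvInv1, pvStep1, pvStepB, hrun, hmx, hprev, PySem.List.pyGetD_zero_cons]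
        · by_cases hwB : w = "B"
          · subst hwB
            simp [pvInv1, pvStep1, pvStepB, hrun, hmx, hprev, PySem.List.pyGetD_zero_cons]
          · simp [pvInv1, pvStep1, pvStepB, hrun, hmx, hprev, hwR, hwB,
                  PySem.List.pyGetD_zero_cons]
      · have hlp : 0 < ws.length := List.length_pos_of_ne_nil hws
        have hn0 : ((ws.length : Int)) ≠ 0 := by
          simp only [ne_eq, Nat.cast_eq_zero]
          omega
        have hlast : (ws.foldl pvStepB init).prev = some (ws.getLast hws) := by
          rw [i8]
          exact List.getLast?_eq_some_getLast hws
        have hgetn1 : PySem.List.pyGetD (ws ++ [w]) ((ws.length : Int) - 1) ""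
            = ws.getLast hws := by
          rw [pvGetD_append_left ws [w] _ "" (by omega) (by omega)]
          rw [PySem.List.pyGetD_eq_getElem _ "" (by omega) (by push_cast; omega)]
          rw [List.getLast_eq_getElem]
          congr 1
          omega
        set a := pvA1 ws with ha
        set st := ws.foldl pvStepB init with hst
        by_cases hwR : w = "R"
        · subst hwR
          by_cases hL : ws.getLast hws = "R"
          · have hr : a.1 = st.run := i9 (by rw [hlast, hL])
            simp only [pvInv1, pvStep1, pvStepB, hgetn, hgetn1, hlast]
            simp [hn0, hL, List.getLast?_concat]
            and_intros <;> (intros; first | (split_ifs <;> omega) | omega | simp_all)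
          · have hL' : (ws.getLast hws == "R") = false := by simp [hL]
            simp only [pvInv1, pvStep1, pvStepB, hgetn, hgetn1, hlast]
            simp [hn0, hL', List.getLast?_concat]
            and_intros <;> (intros; first | (split_ifs <;> omega) | omega | simp_all)
        · by_cases hwB : w = "B"
          · subst hwB
            by_cases hL : ws.getLast hws = "B"
            · have hb : a.2.1 = st.run := i10 (by rw [hlast, hL])
              simp only [pvInv1, pvStep1, pvStepB, hgetn, hgetn1, hlast]
              simp [hn0, hL, List.getLast?_concat]
              and_intros <;> (intros; first | (split_ifs <;> omega) | omega | simp_all)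
            · have hL' : (ws.getLast hws == "B") = false := by simp [hL]
              simp only [pvInv1, pvStep1, pvStepB, hgetn, hgetn1, hlast]
              simp [hn0, hL', List.getLast?_concat]
              and_intros <;> (intros; first | (split_ifs <;> omega) | omega | simp_all)
          · have hR' : (w == "R") = false := by simp [hwR]
            have hB' : (w == "B") = false := by simp [hwB]
            simp only [pvInv1, pvStep1, pvStepB, hgetn, hgetn1, hlast, hR', hB']
            simp [hn0, hwR, hwB, List.getLast?_concat]
            and_intros <;> (intros; first | (split_ifs <;> omega) | omega | simp_all)

-- ===== VERDICT (by name: the statement is the Claim_ definition above) =====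
theorem longest_win_streak_spec : Claim_equal_longest_win_streak := by
  intro players winners _hdom _hpre
  unfold Spec_longest_win_streak
  have hres : (PySem.List.pyRange 4 (PySem.List.len players)).foldl
      (fun q i => q ++ [PySem.List.pyGetD players i ""]) ([] : List String)
      = PySem.List.slice players (some 4) none := by
    rw [PySem.List.foldl_append_singleton_eq_map
          (fun i => PySem.List.pyGetD players i "") _ [],
        PySem.List.map_pyGetD_pyRange players "" (by norm_num),
        PySem.List.slice_from players (by norm_num)]
    rfl
  have hA2 : ∀ (m : Int) (s0 : ASt),
      (PySem.List.pyRange 0 (PySem.List.len winners)).foldl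
        (fun st i => pvStep2 m st (PySem.List.pyGetD winners i "")) s0
      = winners.foldl (pvStep2 m) s0 := by
    intro m s0
    rw [PySem.List.len_eq]
    exact PySem.List.foldl_pyRange_zero_pyGetD' winners "" (pvStep2 m) s0
  have hinv := pvLoop1_inv
    { red := [PySem.List.pyGetD players 0 "", PySem.List.pyGetD players 2 ""],
      blue := [PySem.List.pyGetD players 1 "", PySem.List.pyGetD players 3 ""],
      reserve := PySem.List.slice players (some 4) none,
      records := [], run := 0, mx := 0, rcnt := 0, bcnt := 0, prev := none }
    rfl rfl rfl winners
  have hrel := pvFold_rel (pvA1 winners).2.2 winners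
    { red := [PySem.List.pyGetD players 0 "", PySem.List.pyGetD players 2 ""],
      blue := [PySem.List.pyGetD players 1 "", PySem.List.pyGetD players 3 ""],
      reserve := (PySem.List.pyRange 4 (PySem.List.len players)).foldl
        (fun q i => q ++ [PySem.List.pyGetD players i ""]) [],
      streaks := [], cr := 0, cb := 0 }
    { red := [PySem.List.pyGetD players 0 "", PySem.List.pyGetD players 2 ""],
      blue := [PySem.List.pyGetD players 1 "", PySem.List.pyGetD players 3 ""],
      reserve := PySem.List.slice players (some 4) none,
      records := [], run := 0, mx := 0, rcnt := 0, bcnt := 0, prev := none }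
    ⟨rfl, rfl, hres, rfl, rfl, rfl⟩
  simp only [longest_win_streak, longest_win_streak_alt]
  rw [show (List.foldl (pvStep1 winners) (0, 0, 0)
        (PySem.List.pyRange 0 (PySem.List.len winners))) = pvA1 winners from rfl]
  rw [hA2]
  rw [hrel.2.2.2.2.2]
  rw [hinv.1]
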